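-- pv_equiv track=rewrite | github.com/joojeehwan/algorithm_genius | Programmers/64064_불량사용자/changmok_64064.py | solution
-- ===== SOURCE A (Python) =====
-- from itertools import product
--
-- def solution(user_id, banned_id):
--     lenbid = len(banned_id)
--     possible = [[] for _ in range(lenbid)]
--     for uid in user_id: # 각 유저 아이디에 대하여
--         for bi in range(lenbid): # 불량 아이디를 대조
--             if len(banned_id[bi]) == len(uid): # 길이 일치 여부부터 확인
--                 match = True # 길이가 일치하다면
--                 for i in range(len(uid)): # 문자별로 대조 시작
--                     if banned_id[bi][i] == '*':
--                         continue
--                     if banned_id[bi][i] != uid[i]: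
--                         match = False
--                         break
--                 if match: # 문자열이 일치한다면
--                     possible[bi].append(uid) # 가능성 리스트에 저장
--     answer = []
--     products = list(product(*possible)) # itertools.product()는 입력 받은 iterable 인자들의 데카르트 곱을 구해주는 메서드
--     for prod in products: # 해당 데카르트 곱들에 대하여
--         prod = set(prod) # 집합으로 변환해서 prod 내의 중복 제거
--         if len(prod) < lenbid: # 중복이 제거되어 길이가 짧아지는 경우
--             continue
--         if prod in answer: # answer에 해당 prod가 이미 들어간 경우
--             continue
--         answer.append(prod)
--     return len(answer)
-- ===== SOURCE B (Python) =====
-- def solution(user_id, banned_id):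
--     def matches(b, u):
--         return len(b) == len(u) and all(bc == '*' or bc == uc for bc, uc in zip(b, u))
--
--     possible = [[u for u in user_id if matches(b, u)] for b in banned_id]
--
--     def dfs(cands, used, results):
--         if not cands:
--             s = frozenset(used)
--             if s not in results:
--                 results.append(s)
--             return results
--         for u in cands[0]:
--             if u in used:
--                 continue
--             results = dfs(cands[1:], used + [u], results)
--         return results
--
--     return len(dfs(possible, [], []))
-- ===== Notes on version B (the rewrite author's own statement) =====
-- stated objective: alternative
-- what changed: A materialises the full itertools.product of the per-pattern candidate lists and then filters out tuples with repeated users and duplicate sets; B runs a recursive backtracking DFS over the banned-id positions that skips already-used users during traversal and collects the distinct frozensets of selections.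
import Mathlib
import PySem

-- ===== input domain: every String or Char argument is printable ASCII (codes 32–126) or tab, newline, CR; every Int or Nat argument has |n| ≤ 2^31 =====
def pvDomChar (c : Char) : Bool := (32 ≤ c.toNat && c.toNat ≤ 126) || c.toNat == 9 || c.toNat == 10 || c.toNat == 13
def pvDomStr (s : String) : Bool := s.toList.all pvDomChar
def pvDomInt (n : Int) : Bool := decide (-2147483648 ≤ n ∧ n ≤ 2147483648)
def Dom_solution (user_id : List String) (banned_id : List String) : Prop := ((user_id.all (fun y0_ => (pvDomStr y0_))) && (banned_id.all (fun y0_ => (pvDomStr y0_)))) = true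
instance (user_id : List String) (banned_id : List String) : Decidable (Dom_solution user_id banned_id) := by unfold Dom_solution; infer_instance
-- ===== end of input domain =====

-- B replaces A's itertools.product-then-filter with a backtracking DFS over the banned-id
-- indices that skips already-used users and collects the distinct user-sets (objective: alternative).

-- ===== PORT A =====

-- A's inner character loop (break on mismatch, skip on '*'), as structural recursion
def pvMatchA : List Char → List Char → Bool
  | bc :: bs, uc :: us =>
      if bc == '*' then pvMatchA bs us
      else if bc != uc then false
      else pvMatchA bs us
  | _, _ => true

-- itertools.product(*possible), rightmost factor varying fastest
def pvProduct : List (List String) → List (List String)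
  | [] => [[]]
  | l :: ls => l.flatMap (fun x => (pvProduct ls).map (fun t => x :: t))

def solution (user_id : List String) (banned_id : List String) : Int :=
  let lenbid := banned_id.length
  let possible :=
    user_id.foldl (fun poss uid =>
      (PySem.List.pyRange 0 (lenbid : Int) 1).foldl (fun poss bi =>
        if PySem.Str.len (PySem.List.pyGetD banned_id bi "") == PySem.Str.len uid then
          (if pvMatchA (PySem.List.pyGetD banned_id bi "").toList uid.toList then
            PySem.List.pySetD poss bi (PySem.List.pyGetD poss bi [] ++ [uid])
          else poss)
        else poss) poss)
      (List.replicate lenbid ([] : List String))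
  let answer :=
    (pvProduct possible).foldl (fun ans prod =>
      let s : PySem.Set String := PySem.Set.ofList prod
      if PySem.Set.len s < (lenbid : Int) then ans
      else if ans.any (fun t => PySem.Set.equal t s) then ans
      else ans ++ [s]) []
  (answer.length : Int)

-- ===== PORT B =====

def pvMatchB (b u : String) : Bool :=
  (PySem.Str.len b == PySem.Str.len u)
    && (b.toList.zip u.toList).all (fun p => p.1 == '*' || p.1 == p.2)

-- 'if s not in results: results.append(s)' (results: list of frozensets, == is set equality)
def pvAddSet (results : List (PySem.Set String)) (s : PySem.Set String) : List (PySem.Set String) :=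
  if results.any (fun t => PySem.Set.equal t s) then results else results ++ [s]

-- DFS over the remaining candidate lists, skipping users already used
def pvDfs : List (List String) → List String → List (PySem.Set String) → List (PySem.Set String)
  | [], used, results => pvAddSet results (PySem.Set.ofList used)
  | c :: cs, used, results =>
      c.foldl (fun res u => if used.contains u then res else pvDfs cs (used ++ [u]) res) results

def solution_alt (user_id : List String) (banned_id : List String) : Int :=
  let possible := banned_id.map (fun b => user_id.filter (fun u => pvMatchB b u))
  ((pvDfs possible [] []).length : Int)

-- ===== PRECONDITION & SPEC =====
def Spec_solution (user_id : List String) (banned_id : List String) (out : Int) : Prop := out = solution_alt user_id banned_id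
instance (user_id : List String) (banned_id : List String) (out : Int) : Decidable (Spec_solution user_id banned_id out) := by unfold Spec_solution; infer_instance

-- ===== CLAIM (what is proved, stated in full; the proofs are below) =====
def Claim_equal_solution : Prop := ∀ (user_id : List String) (banned_id : List String), Dom_solution user_id banned_id → Spec_solution user_id banned_id (solution user_id banned_id)

-- ===== LEMMAS AND PROOFS =====

-- A's character loop is the zip-all predicate of B
theorem pvMatchA_eq (bs us : List Char) :
    pvMatchA bs us = (bs.zip us).all (fun p => p.1 == '*' || p.1 == p.2) := by
  induction bs generalizing us with
  | nil => simp [pvMatchA]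
  | cons bc bs ih =>
      cases us with
      | nil => simp [pvMatchA]
      | cons uc us =>
          by_cases h : bc = '*'
          · simp [pvMatchA, h, ih]
          · by_cases h2 : bc = uc <;> simp [pvMatchA, h, h2, ih]

-- the combined per-pattern predicate, A-shaped
theorem pvMatchB_eq (b u : String) :
    pvMatchB b u =
      ((PySem.Str.len b == PySem.Str.len u) && pvMatchA b.toList u.toList) := by
  rw [pvMatchB, pvMatchA_eq]

-- inner index loop of A, pointwise effect
theorem pvInner_getD (uid : String) (cond : Nat → Bool) (N : Nat) :
    ∀ (m k : Nat) (poss : List (List String)), poss.length = N → k + m ≤ N →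
      (((List.range' k m).foldl (fun poss bi =>
          if cond bi then poss.set bi (poss.getD bi [] ++ [uid]) else poss) poss).length
        = N)
      ∧ ∀ j : Nat,
        ((List.range' k m).foldl (fun poss bi =>
          if cond bi then poss.set bi (poss.getD bi [] ++ [uid]) else poss) poss).getD j []
        = if k ≤ j ∧ j < k + m ∧ cond j then poss.getD j [] ++ [uid] else poss.getD j [] := by
  intro m
  induction m with
  | zero =>
      intro k poss hlen _
      refine ⟨by simpa using hlen, fun j => ?_⟩
      simp only [List.range'_zero, List.foldl_nil]
      rw [if_neg (by omega)]
  | succ m ih =>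
      intro k poss hlen hkm
      have hstep : (List.range' k (m+1)) = k :: List.range' (k+1) m := by
        simp [List.range'_succ]
      rw [hstep]
      simp only [List.foldl_cons]
      have hklt : k < poss.length := by omega
      have hplen : (if cond k then poss.set k (poss.getD k [] ++ [uid]) else poss).length = N := by
        by_cases h : cond k <;> simp [h, hlen]
      rcases ih (k+1) _ hplen (by omega) with ⟨hlen', hget⟩
      refine ⟨hlen', fun j => ?_⟩
      have hps : ∀ j : Nat,
          (if cond k then poss.set k (poss.getD k [] ++ [uid]) else poss).getD j []
          = if j = k ∧ cond k then poss.getD k [] ++ [uid] else poss.getD j [] := by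
        intro j
        by_cases h : cond k <;> by_cases hjk : j = k <;>
          · first
            | (subst hjk; simp [h, List.getD_eq_getElem?_getD, hklt])
            | (have hkj : ¬ k = j := fun he => hjk he.symm
               simp [h, hjk, hkj, List.getD_eq_getElem?_getD, hklt])
      rw [hget j, hps j]
      by_cases hjk : j = k
      · subst hjk
        rw [if_neg (by omega)]
        by_cases hc : cond j
        · rw [if_pos ⟨rfl, hc⟩, if_pos ⟨le_refl j, by omega, hc⟩]
        · rw [if_neg (fun h => hc h.2), if_neg (fun h => hc h.2.2)]
      · simp only [hjk, false_and, if_false]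
        by_cases hcc : k + 1 ≤ j ∧ j < k + 1 + m ∧ cond j = true
        · rw [if_pos hcc, if_pos ⟨by omega, by omega, hcc.2.2⟩]
        · rw [if_neg hcc, if_neg ?_]
          rintro ⟨ha, hb, hcnd⟩
          exact hcc ⟨by omega, by omega, hcnd⟩

-- one pass of A's user loop, on a state of the invariant shape
theorem pvInnerFold_eq (banned_id : List String) (uid : String) (g : String → List String) :
    (List.range' 0 banned_id.length).foldl
      (fun poss bi => if pvMatchB (banned_id.getD bi "") uid
        then poss.set bi (poss.getD bi [] ++ [uid]) else poss)
      (banned_id.map g)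
    = banned_id.map (fun b => g b ++ if pvMatchB b uid then [uid] else []) := by
  rcases pvInner_getD uid (fun bi => pvMatchB (banned_id.getD bi "") uid) banned_id.length
      banned_id.length 0 (banned_id.map g) (by simp) (by omega) with ⟨hlen, hget⟩
  apply List.ext_getElem (by rw [List.length_map]; exact hlen)
  intro j h1 h2
  have hj : j < banned_id.length := by simpa using h2
  have hbj : banned_id.getD j "" = banned_id[j] := List.getD_eq_getElem _ _ hj
  have hmapj : (banned_id.map g).getD j [] = g banned_id[j] := by
    rw [List.getD_eq_getElem _ _ (by simpa using hj)]; simp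
  rw [← List.getD_eq_getElem _ ([] : List String) h1, hget j]
  simp only [Nat.zero_add, hbj, hmapj]
  by_cases hc : pvMatchB banned_id[j] uid <;>
    simp [hc, hj]

-- nested conditionals with the same else-branch collapse to a conjunction
theorem pvIfAnd (c1 c2 : Bool) (X Y : List (List String)) :
    (if c1 && c2 then X else Y) = if c1 then (if c2 then X else Y) else Y := by
  cases c1 <;> cases c2 <;> simp

-- A's construction of `possible` equals B's map/filter form
theorem possible_eq (user_id banned_id : List String) :
    (user_id.foldl (fun poss uid =>
      (PySem.List.pyRange 0 (banned_id.length : Int) 1).foldl (fun poss bi =>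
        if PySem.Str.len (PySem.List.pyGetD banned_id bi "") == PySem.Str.len uid then
          (if pvMatchA (PySem.List.pyGetD banned_id bi "").toList uid.toList then
            PySem.List.pySetD poss bi (PySem.List.pyGetD poss bi [] ++ [uid])
          else poss)
        else poss) poss)
      (List.replicate banned_id.length ([] : List String)))
    = banned_id.map (fun b => user_id.filter (fun u => pvMatchB b u)) := by
  -- first: each pass of the user loop is the Nat-index fold of pvInnerFold_eq
  have hconv : ∀ (uid : String) (poss : List (List String)),
      (PySem.List.pyRange 0 (banned_id.length : Int) 1).foldl (fun poss bi =>
        if PySem.Str.len (PySem.List.pyGetD banned_id bi "") == PySem.Str.len uid then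
          (if pvMatchA (PySem.List.pyGetD banned_id bi "").toList uid.toList then
            PySem.List.pySetD poss bi (PySem.List.pyGetD poss bi [] ++ [uid])
          else poss)
        else poss) poss
      = (List.range' 0 banned_id.length).foldl
          (fun poss bi => if pvMatchB (banned_id.getD bi "") uid
            then poss.set bi (poss.getD bi [] ++ [uid]) else poss) poss := by
    intro uid poss
    rw [PySem.List.pyRange_one]
    simp only [Int.sub_zero, Int.toNat_natCast, List.foldl_map, PySem.List.pyGetD_natCast,
      PySem.List.pySetD_natCast, Int.zero_add, List.range_eq_range']
    apply PySem.List.foldl_congr_mem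
    intro acc x _
    rw [pvMatchB_eq]
    exact (pvIfAnd _ _ _ _).symm
  -- then: the outer loop keeps the invariant 'poss = banned_id.map (prefix-filter)'
  have aux : ∀ (us : List String) (pref : List String),
      us.foldl (fun poss uid =>
        (PySem.List.pyRange 0 (banned_id.length : Int) 1).foldl (fun poss bi =>
          if PySem.Str.len (PySem.List.pyGetD banned_id bi "") == PySem.Str.len uid then
            (if pvMatchA (PySem.List.pyGetD banned_id bi "").toList uid.toList then
              PySem.List.pySetD poss bi (PySem.List.pyGetD poss bi [] ++ [uid])
            else poss)
          else poss) poss)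
        (banned_id.map (fun b => pref.filter (fun u => pvMatchB b u)))
      = banned_id.map (fun b => (pref ++ us).filter (fun u => pvMatchB b u)) := by
    intro us
    induction us with
    | nil => intro pref; simp
    | cons uid us ih =>
        intro pref
        rw [List.foldl_cons, hconv, pvInnerFold_eq]
        have hshape : (banned_id.map fun b =>
            pref.filter (fun u => pvMatchB b u) ++ if pvMatchB b uid then [uid] else [])
            = banned_id.map (fun b => (pref ++ [uid]).filter (fun u => pvMatchB b u)) := by
          apply List.map_congr_left
          intro b _
          cases h : pvMatchB b uid <;> simp [List.filter_append, List.filter, h]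
        rw [hshape, ih (pref ++ [uid])]
        simp
  have h0 : (List.replicate banned_id.length ([] : List String))
      = banned_id.map (fun b => ([] : List String).filter (fun u => pvMatchB b u)) := by
    simp [List.map_const', List.filter]
  rw [h0]
  simpa using aux user_id []

-- every tuple of the product has full length
theorem length_of_mem_pvProduct (ps : List (List String)) :
    ∀ prod ∈ pvProduct ps, prod.length = ps.length := by
  induction ps with
  | nil => intro prod h; simp [pvProduct] at h; simp [h]
  | cons p ps ih =>
      intro prod h
      simp only [pvProduct, List.mem_flatMap, List.mem_map] at h
      obtain ⟨x, hx, t, ht, rfl⟩ := h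
      simp [ih t ht]

-- deduplication strictly shrinks a list with duplicates
theorem ofList_length_lt_of_not_nodup (l : List String) (h : ¬ l.Nodup) :
    (PySem.Set.ofList l).length < l.length := by
  induction l with
  | nil => simp at h
  | cons x xs ih =>
      rw [PySem.Set.ofList_cons]
      have hd : ((PySem.Set.ofList xs).discard x).length ≤ (PySem.Set.ofList xs).length :=
        List.length_filter_le _ _
      by_cases hx : xs.Nodup
      · have hxmem : x ∈ xs := by
          simp [List.nodup_cons, hx] at h; exact h
        have hmem : x ∈ PySem.Set.ofList xs := (PySem.Set.mem_ofList xs x).mpr hxmem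
        have hne : ((PySem.Set.ofList xs).discard x).length ≠ (PySem.Set.ofList xs).length := by
          intro he
          have := (List.length_filter_eq_length_iff.mp he) x hmem
          simp at this
        have hle := PySem.Set.length_ofList_le xs
        simp only [List.length_cons]
        omega
      · have := ih hx
        have hle := PySem.Set.length_ofList_le xs
        simp only [List.length_cons]
        omega

-- DFS = fold of set-insertion over the duplicate-free selections of the product
theorem pvDfs_eq (ps : List (List String)) :
    ∀ (used : List String) (res : List (PySem.Set String)),
      pvDfs ps used res
        = ((pvProduct ps).filter
            (fun sel => sel.all (fun u => !used.contains u) && decide sel.Nodup)).foldl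
            (fun r sel => pvAddSet r (PySem.Set.ofList (used ++ sel))) res := by
  induction ps with
  | nil => intro used res; simp [pvDfs, pvProduct, List.filter]
  | cons c cs ih =>
      intro used res
      rw [pvDfs]
      show c.foldl (fun res u => if used.contains u then res else pvDfs cs (used ++ [u]) res) res = _
      conv_rhs => rw [pvProduct]
      rw [List.filter_flatMap, List.foldl_flatMap]
      apply PySem.List.foldl_congr_mem
      intro acc u _
      by_cases hu : used.contains u
      · rw [if_pos hu]
        have : ((pvProduct cs).map (fun t => u :: t)).filter
            (fun sel => sel.all (fun v => !used.contains v) && decide sel.Nodup) = [] := by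
          apply List.filter_eq_nil_iff.mpr
          intro sel hsel
          simp only [List.mem_map] at hsel
          obtain ⟨t, _, rfl⟩ := hsel
          have hu' : u ∈ used := by simpa using hu
          simp [hu']
        rw [this, List.foldl_nil]
      · have hu' : u ∉ used := by simpa using hu
        rw [if_neg hu, ih (used ++ [u]) acc]
        rw [List.filter_map, List.foldl_map]
        have hfil : List.filter
            (fun sel => (sel.all fun v => !(used ++ [u]).contains v) && decide sel.Nodup)
            (pvProduct cs)
            = List.filter ((fun sel => (sel.all fun v => !used.contains v) && decide sel.Nodup)
                ∘ (fun t => u :: t)) (pvProduct cs) := by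
          apply List.filter_congr
          intro sel _
          rw [Bool.eq_iff_iff]
          simp only [Function.comp_apply, List.all_cons, List.all_eq_true, List.nodup_cons,
            Bool.and_eq_true, Bool.not_eq_true', List.contains_eq_mem, List.mem_append,
            List.mem_cons, decide_eq_true_eq, decide_eq_false_iff_not, List.not_mem_nil,
            or_false]
          constructor
          · rintro ⟨h2, h4⟩
            refine ⟨⟨by simpa using hu', fun v hv => ?_⟩, fun hmem => ?_, h4⟩
            · have := h2 v hv; intro hm; exact this (Or.inl hm)
            · have := h2 u hmem; exact this (Or.inr rfl)
          · rintro ⟨⟨h1, h2⟩, h3, h4⟩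
            refine ⟨fun v hv => ?_, h4⟩
            have h' := h2 v hv
            have hvne : ¬ v = u := fun he => h3 (he ▸ hv)
            intro hm
            rcases hm with hm | hm
            · exact h' hm
            · exact hvne hm
        rw [hfil]
        apply PySem.List.foldl_congr_mem
        intro r sel _
        have hap : used ++ [u] ++ sel = used ++ u :: sel := by simp
        rw [hap]

-- ===== VERDICT (by name: the statement is the Claim_ definition above) =====
theorem solution_spec : Claim_equal_solution := by
  intro user_id banned_id _
  show solution user_id banned_id = solution_alt user_id banned_id
  rw [solution, solution_alt]
  simp only []
  rw [possible_eq]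
  set possB := banned_id.map (fun b => user_id.filter (fun u => pvMatchB b u)) with hpossB
  have hlenp : possB.length = banned_id.length := by simp [hpossB]
  -- A's answer loop = fold of pvAddSet over the duplicate-free selections
  have hA : (pvProduct possB).foldl (fun ans prod =>
        let s : PySem.Set String := PySem.Set.ofList prod
        if PySem.Set.len s < (banned_id.length : Int) then ans
        else if ans.any (fun t => PySem.Set.equal t s) then ans
        else ans ++ [s]) []
      = ((pvProduct possB).filter (fun prod => decide prod.Nodup)).foldl
          (fun ans prod => pvAddSet ans (PySem.Set.ofList prod)) [] := by
    rw [PySem.List.foldl_congr_mem _ _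
      (fun ans prod => if decide prod.Nodup then pvAddSet ans (PySem.Set.ofList prod) else ans) _ ?_]
    · rw [PySem.List.foldl_if_eq_foldl_filter]
    · intro acc prod hmem
      have hl : prod.length = banned_id.length := by
        rw [length_of_mem_pvProduct possB prod hmem, hlenp]
      by_cases hn : prod.Nodup
      · have he : PySem.Set.ofList prod = prod := PySem.Set.ofList_eq_self_of_nodup prod hn
        have hnlt : ¬ (PySem.Set.len (PySem.Set.ofList prod) < (banned_id.length : Int)) := by
          rw [he]; simp [PySem.Set.len, hl]
        rw [if_neg hnlt]
        simp [pvAddSet, hn]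
      · have hlt : (PySem.Set.ofList prod).length < prod.length :=
          ofList_length_lt_of_not_nodup prod hn
        have hyes : PySem.Set.len (PySem.Set.ofList prod) < (banned_id.length : Int) := by
          simp only [PySem.Set.len]
          omega
        rw [if_pos hyes]
        simp [hn]
  rw [hA, pvDfs_eq]
  have hfilter : ((pvProduct possB).filter
      (fun sel => sel.all (fun u => !([] : List String).contains u) && decide sel.Nodup))
      = (pvProduct possB).filter (fun prod => decide prod.Nodup) := by
    apply List.filter_congr; intro sel _; simp
  rw [hfilter]
  have hfun : (fun (r : List (PySem.Set String)) sel =>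
      pvAddSet r (PySem.Set.ofList (([] : List String) ++ sel)))
      = fun r sel => pvAddSet r (PySem.Set.ofList sel) := by
    funext r sel; simp
  rw [hfun]
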